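-- pv_equiv track=rewrite | github.com/Pawel-Kluska/Scripting_Languages | Lista5/Zadanie1.py | get_dict_country
-- ===== SOURCE A (Python) =====
-- def get_dict_country(allCases):
--     dict_c = {}
--     for case in allCases:
--         key = case[0]
--         if key in dict_c:
--             dict_c[key].append((case[1], case[2], case[3], case[4], case[5]))
--         else:
--             dict_c[key] = [(case[1], case[2], case[3], case[4], case[5])]
--
--     return dict_c
-- ===== SOURCE B (Python) =====
-- def get_dict_country(allCases):
--     # two-pass grouping: ordered key dedup, then one filter pass per key
--     keys = list(dict.fromkeys(case[0] for case in allCases))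
--     return {k: [(c[1], c[2], c[3], c[4], c[5]) for c in allCases if c[0] == k]
--             for k in keys}
-- ===== Notes on version B (the rewrite author's own statement) =====
-- stated objective: alternative
-- what changed: Replaces the single-pass hash-membership grouping (append-or-create per case) with a two-pass decomposition: first an ordered dedup of the country keys, then a dict comprehension that collects each key's tuples by filtering the whole list per key.
import Mathlib
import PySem

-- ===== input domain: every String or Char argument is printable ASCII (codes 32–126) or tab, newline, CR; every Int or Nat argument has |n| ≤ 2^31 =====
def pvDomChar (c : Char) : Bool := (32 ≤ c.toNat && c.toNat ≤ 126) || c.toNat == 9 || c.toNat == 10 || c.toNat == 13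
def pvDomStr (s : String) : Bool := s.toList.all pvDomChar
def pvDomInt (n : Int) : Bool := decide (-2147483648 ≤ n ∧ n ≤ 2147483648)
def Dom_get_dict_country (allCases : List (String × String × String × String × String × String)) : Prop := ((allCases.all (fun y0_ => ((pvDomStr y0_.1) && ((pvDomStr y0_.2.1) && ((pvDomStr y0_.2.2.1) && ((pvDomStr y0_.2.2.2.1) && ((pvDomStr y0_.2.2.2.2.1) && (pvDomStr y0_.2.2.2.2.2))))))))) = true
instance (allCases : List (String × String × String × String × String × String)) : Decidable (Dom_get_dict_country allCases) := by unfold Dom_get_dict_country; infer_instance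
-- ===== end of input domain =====

-- B replaces A's single-pass membership-test grouping with a two-pass decomposition
-- (ordered key dedup, then one filter pass per key); objective: alternative algorithm, same result.


-- ===== PORT A =====
-- (case[1], case[2], case[3], case[4], case[5])
def pvProj (c : String × String × String × String × String × String) : String × String × String × String × String :=
  (c.2.1, c.2.2.1, c.2.2.2.1, c.2.2.2.2.1, c.2.2.2.2.2)

def get_dict_country (allCases : List (String × String × String × String × String × String)) : List (String × List (String × String × String × String × String)) :=
  (allCases.foldl (fun dict_c case =>
      if dict_c.contains case.1 then
        dict_c.modify case.1 [] (fun l => l ++ [pvProj case])   -- dict_c[key].append(...)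
      else
        dict_c.insert case.1 [pvProj case])
    PySem.Dict.empty).items

-- ===== PORT B =====
def get_dict_country_alt (allCases : List (String × String × String × String × String × String)) : List (String × List (String × String × String × String × String)) :=
  (PySem.List.dedup (allCases.map (·.1))).map (fun k =>
    (k, (allCases.filter (fun c => c.1 == k)).map
          (fun c => (c.2.1, c.2.2.1, c.2.2.2.1, c.2.2.2.2.1, c.2.2.2.2.2))))

-- ===== PRECONDITION & SPEC =====
def Spec_get_dict_country (allCases : List (String × String × String × String × String × String)) (out : List (String × List (String × String × String × String × String))) : Prop := out = get_dict_country_alt allCases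
instance (allCases : List (String × String × String × String × String × String)) (out : List (String × List (String × String × String × String × String))) : Decidable (Spec_get_dict_country allCases out) := by
  unfold Spec_get_dict_country
  exact @instDecidableEqList _ instDecidableEqProd out (get_dict_country_alt allCases)

-- ===== CLAIM (what is proved, stated in full; the proofs are below) =====
def Claim_equal_get_dict_country : Prop := ∀ (allCases : List (String × String × String × String × String × String)), Dom_get_dict_country allCases → Spec_get_dict_country allCases (get_dict_country allCases)

-- ===== LEMMAS AND PROOFS =====

-- foldl respects pointwise-equal step functions
theorem pv_foldl_congr {α β : Type} (f g : β → α → β) (init : β) (l : List α)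
    (h : ∀ b a, a ∈ l → f b a = g b a) : l.foldl f init = l.foldl g init := by
  induction l generalizing init with
  | nil => rfl
  | cons x xs ih =>
    simp only [List.foldl_cons, h init x (by simp)]
    exact ih _ (fun b a ha => h b a (by simp [ha]))

-- A's loop body (membership test, then append-or-create) is exactly `dict.modify key [] (· ++ [pvProj case])`.
theorem pv_step_eq_modify (d : PySem.Dict String (List (String × String × String × String × String)))
    (c : String × String × String × String × String × String) :
    (if d.contains c.1 then d.modify c.1 [] (fun l => l ++ [pvProj c]) else d.insert c.1 [pvProj c])
      = d.modify c.1 [] (fun l => l ++ [pvProj c]) := by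
  by_cases h : d.contains c.1
  · simp [h]
  · have h' : d.contains c.1 = false := by simpa using h
    simp [h, PySem.Dict.modify, PySem.Dict.getD_of_not_contains _ _ h']

-- ===== VERDICT (by name: the statement is the Claim_ definition above) =====
theorem get_dict_country_spec : Claim_equal_get_dict_country := by
  intro allCases _
  unfold Spec_get_dict_country get_dict_country get_dict_country_alt
  have hfold :
      (allCases.foldl (fun dict_c case =>
          if dict_c.contains case.1 then dict_c.modify case.1 [] (fun l => l ++ [pvProj case])
          else dict_c.insert case.1 [pvProj case]) PySem.Dict.empty)
        = allCases.foldl (fun d c => d.modify c.1 [] (fun l => l ++ [pvProj c])) PySem.Dict.empty := by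
    exact pv_foldl_congr _ _ PySem.Dict.empty allCases (fun d c _ => pv_step_eq_modify d c)
  rw [hfold]
  have hnodup :
      (allCases.foldl (fun d c => d.modify c.1 [] (fun l => l ++ [pvProj c])) PySem.Dict.empty).keys.Nodup := by
    exact PySem.Dict.nodup_keys_foldl_modify_key allCases (·.1) [] (fun _ c l => l ++ [pvProj c])
      PySem.Dict.empty (by simp)
  rw [PySem.Dict.items_eq_map_keys _ hnodup []]
  have hkeys :
      (allCases.foldl (fun d c => d.modify c.1 [] (fun l => l ++ [pvProj c])) PySem.Dict.empty).keys
        = PySem.List.dedup (allCases.map (·.1)) := by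
    rw [PySem.Dict.keys_foldl_modify_key allCases (·.1) [] (fun _ c l => l ++ [pvProj c]) PySem.Dict.empty]
    simp [PySem.Set.update, PySem.Set.ofList]
  rw [hkeys]
  apply List.map_congr_left
  intro k _
  have hpairs :
      allCases.foldl (fun d c => d.modify c.1 [] (fun l => l ++ [pvProj c])) PySem.Dict.empty
        = (allCases.map (fun c => (c.1, pvProj c))).foldl
            (fun d p => d.modify p.1 [] (fun l => l ++ [p.2])) PySem.Dict.empty := by
    rw [List.foldl_map]
  rw [hpairs, PySem.Dict.getD_foldl_modify_append]
  simp [pvProj]
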